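-- pv_equiv track=rewrite | github.com/wthaovan112233-cyber/phantich.md5 | bot.py | break_signal
-- ===== SOURCE A (Python) =====
-- def break_signal(tx):
--     if len(tx) < 4: return None, 0
--     last = tx[-1]
--     count = 1
--     for i in range(len(tx)-2, -1, -1):
--         if tx[i] == last:
--             count += 1
--         else:
--             break
--     if count >= 4:
--         return ("T" if last == "X" else "X"), 2
--     return None, 0
-- ===== SOURCE B (Python) =====
-- def break_signal(tx):
--     # Fixed-window check: a trailing run of length >= 4 exists iff the last
--     # four elements are all equal -- no backward scan needed.
--     if len(tx) < 4:
--         return None, 0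
--     last = tx[-1]
--     if tx[-2] == last and tx[-3] == last and tx[-4] == last:
--         return ("T" if last == "X" else "X"), 2
--     return None, 0
-- ===== Notes on version B (the rewrite author's own statement) =====
-- stated objective: simpler
-- what changed: B replaces A's backward loop counting the whole trailing run with a fixed-window check that the last four elements are equal (run length >= 4 iff the last four are equal), eliminating the loop entirely.
import Mathlib
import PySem

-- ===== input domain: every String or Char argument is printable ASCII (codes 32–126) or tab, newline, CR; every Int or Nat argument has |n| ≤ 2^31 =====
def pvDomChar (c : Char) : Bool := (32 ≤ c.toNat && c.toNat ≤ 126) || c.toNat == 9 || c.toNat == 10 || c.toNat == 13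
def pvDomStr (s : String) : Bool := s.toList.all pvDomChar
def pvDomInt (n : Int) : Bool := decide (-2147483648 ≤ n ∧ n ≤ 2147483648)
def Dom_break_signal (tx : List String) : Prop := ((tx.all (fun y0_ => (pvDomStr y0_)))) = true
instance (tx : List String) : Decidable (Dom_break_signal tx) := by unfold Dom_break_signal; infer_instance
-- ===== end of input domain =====

-- B replaces A's backward trailing-run scan with a loop-free check of the last four elements (simpler: run ≥ 4 iff the last four are equal).


-- ===== PORT A =====
-- the 'for i in range(len(tx)-2, -1, -1): … else: break' loop, recursion over the range list
def breakLoopA (tx : List String) (last : String) : List Int → Int → Int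
  | [], count => count
  | i :: rest, count =>
      if PySem.List.pyGetD tx i "" = last then breakLoopA tx last rest (count + 1)
      else count

def break_signal (tx : List String) : Option String × Int :=
  if tx.length < 4 then (none, 0)
  else
    let last := PySem.List.pyGetD tx (-1) ""
    let count := breakLoopA tx last (PySem.List.pyRange ((tx.length : Int) - 2) (-1) (-1)) 1
    if 4 ≤ count then (some (if last = "X" then "T" else "X"), 2)
    else (none, 0)

-- ===== PORT B =====
def break_signal_alt (tx : List String) : Option String × Int :=
  if tx.length < 4 then (none, 0)
  else
    let last := PySem.List.pyGetD tx (-1) ""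
    if PySem.List.pyGetD tx (-2) "" = last ∧ PySem.List.pyGetD tx (-3) "" = last ∧
       PySem.List.pyGetD tx (-4) "" = last then
      (some (if last = "X" then "T" else "X"), 2)
    else (none, 0)

-- ===== PRECONDITION & SPEC =====
def Spec_break_signal (tx : List String) (out : Option String × Int) : Prop := out = break_signal_alt tx
instance (tx : List String) (out : Option String × Int) : Decidable (Spec_break_signal tx out) := by unfold Spec_break_signal; infer_instance

-- ===== CLAIM (what is proved, stated in full; the proofs are below) =====
def Claim_equal_break_signal : Prop := ∀ (tx : List String), Dom_break_signal tx → Spec_break_signal tx (break_signal tx)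

-- ===== LEMMAS AND PROOFS =====
theorem pyRange_negOne_cons (a b : Int) (h : b < a) :
    PySem.List.pyRange a b (-1) = a :: PySem.List.pyRange (a - 1) b (-1) := by
  simp only [PySem.List.pyRange]
  norm_num
  have h1 : (a - b).toNat = (a - 1 - b).toNat + 1 := by omega
  rw [if_pos h, h1, List.range_succ_eq_map]
  by_cases h2 : b < a - 1
  · rw [if_pos h2]
    simp [List.map_map, Function.comp_def]
    intro k _
    ring
  · have : a - 1 - b = 0 := by omega
    rw [if_neg h2]
    simp [this]

theorem breakLoopA_ge (tx : List String) (last : String) :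
    ∀ (l : List Int) (c : Int), c ≤ breakLoopA tx last l c := by
  intro l
  induction l with
  | nil => intro c; simp [breakLoopA]
  | cons i r ih =>
      intro c
      simp only [breakLoopA]
      split
      · exact le_trans (by omega) (ih (c + 1))
      · omega

-- ===== VERDICT (by name: the statement is the Claim_ definition above) =====

theorem break_signal_spec : Claim_equal_break_signal := by
  intro tx _
  unfold Spec_break_signal break_signal break_signal_alt
  by_cases h4 : tx.length < 4
  · simp [h4]
  · simp only [if_neg h4]
    have hn : 4 ≤ tx.length := by omega
    rw [pyRange_negOne_cons _ _ (by push_cast; omega),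
        pyRange_negOne_cons _ _ (by push_cast; omega),
        pyRange_negOne_cons _ _ (by push_cast; omega)]
    have g2 : PySem.List.pyGetD tx ((tx.length : Int) - 2) "" = PySem.List.pyGetD tx (-2) "" := by
      rw [PySem.List.pyGetD_neg_ofNat tx 2 "" (by omega) (by omega),
          PySem.List.pyGetD_eq_getElem tx (i := (tx.length : Int) - 2) "" (by omega) (by push_cast; omega)]
      congr 1; omega
    have g3 : PySem.List.pyGetD tx ((tx.length : Int) - 2 - 1) "" = PySem.List.pyGetD tx (-3) "" := by
      rw [PySem.List.pyGetD_neg_ofNat tx 3 "" (by omega) (by omega),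
          PySem.List.pyGetD_eq_getElem tx (i := (tx.length : Int) - 2 - 1) "" (by omega) (by push_cast; omega)]
      congr 1; omega
    have g4 : PySem.List.pyGetD tx ((tx.length : Int) - 2 - 1 - 1) "" = PySem.List.pyGetD tx (-4) "" := by
      rw [PySem.List.pyGetD_neg_ofNat tx 4 "" (by omega) (by omega),
          PySem.List.pyGetD_eq_getElem tx (i := (tx.length : Int) - 2 - 1 - 1) "" (by omega) (by push_cast; omega)]
      congr 1; omega
    simp only [breakLoopA, g2, g3, g4]
    by_cases e2 : PySem.List.pyGetD tx (-2) "" = PySem.List.pyGetD tx (-1) ""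
    · by_cases e3 : PySem.List.pyGetD tx (-3) "" = PySem.List.pyGetD tx (-1) ""
      · by_cases e4 : PySem.List.pyGetD tx (-4) "" = PySem.List.pyGetD tx (-1) ""
        · have h := breakLoopA_ge tx (PySem.List.pyGetD tx (-1) "")
            (PySem.List.pyRange ((tx.length : Int) - 2 - 1 - 1 - 1) (-1) (-1)) 4
          simp [e2, e3, e4, if_pos (le_trans (by omega : (4:Int) ≤ 4) h)]
        · simp [e2, e3, e4]
      · simp [e2, e3]
    · simp [e2]
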